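-- pv_equiv track=rewrite | github.com/ConradLu2740/contract-key-extractor | ai-service/core/extractor.py | _fix_json_string
-- ===== SOURCE A (Python) =====
-- def _fix_json_string(json_str: str) -> str:
--     result = []
--     in_string = False
--     escape_next = False
--     i = 0
--
--     while i < len(json_str):
--         char = json_str[i]
--
--         if escape_next:
--             result.append(char)
--             escape_next = False
--             i += 1
--             continue
--
--         if char == '\\':
--             result.append(char)
--             escape_next = True
--             i += 1
--             continue
--
--         if char == '"':
--             if in_string:
--                 next_non_space = i + 1
--                 while next_non_space < len(json_str) and json_str[next_non_space] in ' \t\n\r':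
--                     next_non_space += 1
--
--                 if next_non_space < len(json_str) and json_str[next_non_space] in ':,}]':
--                     in_string = False
--                     result.append(char)
--                 else:
--                     result.append('\\"')
--             else:
--                 in_string = True
--                 result.append(char)
--             i += 1
--             continue
--
--         if in_string:
--             if char == '\n':
--                 result.append(' ')
--             elif char == '\r':
--                 pass
--             elif char == '\t':
--                 result.append(' ')
--             else:
--                 result.append(char)
--         else:
--             result.append(char)
--
--         i += 1
--
--     return ''.join(result)
-- ===== SOURCE B (Python) =====
-- def _fix_json_string(json_str: str) -> str:
--     # Pass 1 (reverse): nxt[i] = first character after position i that is not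
--     # in ' \t\n\r', or None.  Pass 2 (forward): one O(1) decision per char.
--     WS = ' \t\n\r'
--     nxt = []
--     follow = None
--     for ch in reversed(json_str):
--         nxt.append(follow)
--         if ch not in WS:
--             follow = ch
--     nxt.reverse()
--
--     out = []
--     in_string = False
--     escape = False
--     for i, ch in enumerate(json_str):
--         if escape:
--             out.append(ch)
--             escape = False
--         elif ch == '\\':
--             out.append(ch)
--             escape = True
--         elif ch == '"':
--             if in_string:
--                 if nxt[i] in (':', ',', '}', ']'):
--                     in_string = False
--                     out.append('"')
--                 else:
--                     out.append('\\"')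
--             else:
--                 in_string = True
--                 out.append('"')
--         elif in_string:
--             if ch == '\n' or ch == '\t':
--                 out.append(' ')
--             elif ch == '\r':
--                 pass
--             else:
--                 out.append(ch)
--         else:
--             out.append(ch)
--     return ''.join(out)
-- ===== Notes on version B (the rewrite author's own statement) =====
-- stated objective: faster
-- what changed: B replaces A's per-quote inner whitespace scan by a single reverse pass that precomputes, for every position, the next non-whitespace character, so each closing-quote decision is an O(1) array lookup.
import Mathlib
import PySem

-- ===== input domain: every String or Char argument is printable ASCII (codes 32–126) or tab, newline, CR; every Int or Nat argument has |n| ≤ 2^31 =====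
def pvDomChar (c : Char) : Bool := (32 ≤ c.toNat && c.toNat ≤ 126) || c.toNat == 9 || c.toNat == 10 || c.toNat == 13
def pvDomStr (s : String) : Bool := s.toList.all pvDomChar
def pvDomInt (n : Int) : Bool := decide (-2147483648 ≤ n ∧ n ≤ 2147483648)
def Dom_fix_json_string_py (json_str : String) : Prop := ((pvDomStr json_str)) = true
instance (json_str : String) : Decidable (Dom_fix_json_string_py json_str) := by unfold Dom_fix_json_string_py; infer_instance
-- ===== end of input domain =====

-- B replaces A's per-closing-quote forward whitespace scan by one reverse pass
-- precomputing the next non-whitespace character per position (objective: faster, O(n) vs O(n^2) worst case).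

-- ===== PORT A =====

-- A's inner while loop: skip ' \t\n\r' from the chars after the quote, return the
-- first other character (none = ran off the end).
def pvNextNonSpace : List Char → Option Char
  | [] => none
  | c :: rest => if c = ' ' ∨ c = '\t' ∨ c = '\n' ∨ c = '\r' then pvNextNonSpace rest else some c

-- A's main while loop, as structural recursion on the remaining suffix
-- (state: in_string, escape_next; the inner scan from i+1 scans the tail).
def pvLoopA : List Char → Bool → Bool → List Char
  | [], _, _ => []
  | c :: rest, inStr, esc =>
    if esc then c :: pvLoopA rest inStr false
    else if c = '\\' then c :: pvLoopA rest inStr true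
    else if c = '"' then
      if inStr then
        match pvNextNonSpace rest with
        | some d =>
          if d = ':' ∨ d = ',' ∨ d = '}' ∨ d = ']' then c :: pvLoopA rest false false
          else '\\' :: '"' :: pvLoopA rest inStr false
        | none => '\\' :: '"' :: pvLoopA rest inStr false
      else c :: pvLoopA rest true false
    else if inStr then
      if c = '\n' then ' ' :: pvLoopA rest inStr false
      else if c = '\r' then pvLoopA rest inStr false
      else if c = '\t' then ' ' :: pvLoopA rest inStr false
      else c :: pvLoopA rest inStr false
    else c :: pvLoopA rest inStr false

def fix_json_string_py (json_str : String) : String :=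
  String.mk (pvLoopA json_str.toList false false)

-- ===== PORT B =====

def pvIsWS (c : Char) : Bool := c = ' ' ∨ c = '\t' ∨ c = '\n' ∨ c = '\r'

-- B pass 1: iterate over reversed(json_str), appending the running 'follow'
-- (next non-whitespace char seen so far) before updating it; then nxt.reverse().
def pvBuildRev (cs : List Char) : List (Option Char) × Option Char :=
  cs.reverse.foldl
    (fun acc ch => (acc.1 ++ [acc.2], if pvIsWS ch then acc.2 else some ch))
    ([], none)

def pvNxt (cs : List Char) : List (Option Char) :=
  (pvBuildRev cs).1.reverse

-- B pass 2: single forward fold over (char, nxt[i]) pairs with (out, in_string, escape).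
def pvStepB (st : List Char × Bool × Bool) (p : Char × Option Char) : List Char × Bool × Bool :=
  let (out, inStr, esc) := st
  let (ch, nx) := p
  if esc then (out ++ [ch], inStr, false)
  else if ch = '\\' then (out ++ [ch], inStr, true)
  else if ch = '"' then
    if inStr then
      -- 'nxt[i] in (":", ...)': None compares unequal to every char, so option equality is exact
      if nx = some ':' ∨ nx = some ',' ∨ nx = some '}' ∨ nx = some ']' then (out ++ ['"'], false, false)
      else (out ++ ['\\', '"'], inStr, false)
    else (out ++ ['"'], true, false)
  else if inStr then
    if ch = '\n' ∨ ch = '\t' then (out ++ [' '], inStr, false)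
    else if ch = '\r' then (out, inStr, false)
    else (out ++ [ch], inStr, false)
  else (out ++ [ch], inStr, false)

def fix_json_string_py_alt (json_str : String) : String :=
  String.mk ((json_str.toList.zip (pvNxt json_str.toList)).foldl pvStepB ([], false, false)).1

-- ===== PRECONDITION & SPEC =====
def Spec_fix_json_string_py (json_str : String) (out : String) : Prop := out = fix_json_string_py_alt json_str
instance (json_str : String) (out : String) : Decidable (Spec_fix_json_string_py json_str out) := by unfold Spec_fix_json_string_py; infer_instance

-- ===== CLAIM (what is proved, stated in full; the proofs are below) =====
def Claim_equal_fix_json_string_py : Prop := ∀ (json_str : String), Dom_fix_json_string_py json_str → Spec_fix_json_string_py json_str (fix_json_string_py json_str)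

-- ===== LEMMAS AND PROOFS =====

theorem pvBuildRev_cons (c : Char) (rest : List Char) :
    pvBuildRev (c :: rest) =
      ((pvBuildRev rest).1 ++ [(pvBuildRev rest).2],
        if pvIsWS c then (pvBuildRev rest).2 else some c) := by
  simp [pvBuildRev, List.foldl_append]

theorem pvBuildRev_snd (cs : List Char) : (pvBuildRev cs).2 = pvNextNonSpace cs := by
  induction cs with
  | nil => simp [pvBuildRev, pvNextNonSpace]
  | cons c rest ih =>
    rw [pvBuildRev_cons, pvNextNonSpace]
    by_cases h : c = ' ' ∨ c = '\t' ∨ c = '\n' ∨ c = '\r' <;>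
      simp [pvIsWS, h, ih]

theorem pvNxt_cons (c : Char) (rest : List Char) :
    pvNxt (c :: rest) = pvNextNonSpace rest :: pvNxt rest := by
  simp [pvNxt, pvBuildRev_cons, pvBuildRev_snd]

-- The forward fold of B, run from any accumulator, appends exactly A's output.
theorem pvFold_eq (cs : List Char) : ∀ (out : List Char) (inStr esc : Bool),
    ((cs.zip (pvNxt cs)).foldl pvStepB (out, inStr, esc)).1 = out ++ pvLoopA cs inStr esc := by
  induction cs with
  | nil => intro out inStr esc; simp [pvNxt, pvBuildRev, pvLoopA]
  | cons c rest ih =>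
    intro out inStr esc
    rw [pvNxt_cons]
    simp only [List.zip_cons_cons, List.foldl_cons]
    by_cases hesc : esc = true
    · simp [pvStepB, pvLoopA, hesc, ih]
    · replace hesc : esc = false := by cases esc <;> simp_all
      subst hesc
      by_cases hbs : c = '\\'
      · simp [pvStepB, pvLoopA, hbs, ih]
      · by_cases hq : c = '"'
        · subst hq
          by_cases hin : inStr = true
          · cases hnx : pvNextNonSpace rest with
            | none => simp [pvStepB, pvLoopA, hin, hnx, ih]
            | some d =>
              by_cases hd : d = ':' ∨ d = ',' ∨ d = '}' ∨ d = ']' <;>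
                simp [pvStepB, pvLoopA, hin, hnx, hd, ih]
          · replace hin : inStr = false := by cases inStr <;> simp_all
            simp [pvStepB, pvLoopA, hin, ih]
        · by_cases hin : inStr = true
          · by_cases hn : c = '\n'
            · simp [pvStepB, pvLoopA, hin, hn, ih]
            · by_cases hr : c = '\r'
              · simp [pvStepB, pvLoopA, hin, hr, ih]
              · by_cases ht : c = '\t' <;>
                  simp [pvStepB, pvLoopA, hbs, hq, hin, hn, hr, ht, ih]
          · replace hin : inStr = false := by cases inStr <;> simp_all
            simp [pvStepB, pvLoopA, hbs, hq, hin, ih]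

-- ===== VERDICT (by name: the statement is the Claim_ definition above) =====
theorem fix_json_string_py_spec : Claim_equal_fix_json_string_py := by
  intro s _
  unfold Spec_fix_json_string_py fix_json_string_py fix_json_string_py_alt
  rw [pvFold_eq]
  simp
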